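-- pv_equiv track=rewrite | github.com/tejasbargujepatil/BinaryBrains_Agritech-AI | KrishiMitra-backend/app/knowledge/crop_knowledge_base.py | is_season_suitable
-- ===== SOURCE A (Python) =====
-- from typing import Dict, List, Optional
--
-- def is_season_suitable(seasons: List[str], month: int) -> bool:
--     """Check if current month is suitable for planting"""
--     season_months = {
--         "kharif": [6, 7, 8],  # June-Aug
--         "rabi": [10, 11, 12],  # Oct-Dec
--         "summer": [2, 3, 4],  # Feb-Apr
--         "year-round": list(range(1, 13))
--     }
--
--     for season_desc in seasons:
--         season_lower = season_desc.lower()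
--         for season_key, months in season_months.items():
--             if season_key in season_lower and month in months:
--                 return True
--     return False
-- ===== SOURCE B (Python) =====
-- def is_season_suitable(seasons, month):
--     """Check if current month is suitable for planting"""
--     haystack = "\n".join(s.lower() for s in seasons)
--     if not 1 <= month <= 12:
--         return False
--     if "year-round" in haystack:
--         return True
--     if 6 <= month <= 8:
--         return "kharif" in haystack
--     if 10 <= month <= 12:
--         return "rabi" in haystack
--     if 2 <= month <= 4:
--         return "summer" in haystack
--     return False
-- ===== Notes on version B (the rewrite author's own statement) =====
-- stated objective: alternative
-- what changed: B replaces the nested loop over strings and the month-list dict by straight-line code: it joins all lowercased season strings into one newline-separated haystack (season keys contain no newline, so matches cannot cross string boundaries) and dispatches on arithmetic month ranges, doing at most two C-level substring searches on the single haystack.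
import Mathlib
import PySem

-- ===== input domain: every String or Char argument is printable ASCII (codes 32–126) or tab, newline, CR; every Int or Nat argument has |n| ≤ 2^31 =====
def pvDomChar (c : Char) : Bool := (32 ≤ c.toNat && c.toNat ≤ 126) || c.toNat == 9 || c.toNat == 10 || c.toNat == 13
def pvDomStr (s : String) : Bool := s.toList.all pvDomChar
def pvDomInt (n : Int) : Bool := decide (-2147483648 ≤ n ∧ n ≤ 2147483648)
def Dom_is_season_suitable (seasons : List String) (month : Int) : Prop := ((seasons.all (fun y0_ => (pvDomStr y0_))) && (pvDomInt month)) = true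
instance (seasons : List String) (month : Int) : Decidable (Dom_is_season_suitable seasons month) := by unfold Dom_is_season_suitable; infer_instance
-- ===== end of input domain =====

-- B replaces A's nested loops over strings and the month-list dict by straight-line code:
-- one newline-joined lowercased haystack plus arithmetic month-range dispatch (objective: alternative).


-- ===== PORT A =====
-- the fixed season_months dict (insertion order), built at each call in A
def seasonMonthsA : List (String × List Int) :=
  [("kharif", [6, 7, 8]), ("rabi", [10, 11, 12]), ("summer", [2, 3, 4]),
   ("year-round", PySem.List.pyRange 1 13 1)]

-- outer for-loop with early 'return True'; the inner for-loop over the dict items is the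
-- early-returning scan 'any'
def isSeasonLoopA (month : Int) : List String → Bool
  | [] => false
  | season_desc :: rest =>
    let season_lower := PySem.Str.lower season_desc
    if seasonMonthsA.any (fun kv => PySem.Str.isIn kv.1 season_lower && kv.2.contains month)
    then true
    else isSeasonLoopA month rest

def is_season_suitable (seasons : List String) (month : Int) : Bool :=
  isSeasonLoopA month seasons

-- ===== PORT B =====
def is_season_suitable_alt (seasons : List String) (month : Int) : Bool :=
  let haystack := PySem.Str.join "\n" (seasons.map PySem.Str.lower)
  if ¬ (1 ≤ month ∧ month ≤ 12) then false
  else if PySem.Str.isIn "year-round" haystack then true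
  else if 6 ≤ month ∧ month ≤ 8 then PySem.Str.isIn "kharif" haystack
  else if 10 ≤ month ∧ month ≤ 12 then PySem.Str.isIn "rabi" haystack
  else if 2 ≤ month ∧ month ≤ 4 then PySem.Str.isIn "summer" haystack
  else false

-- ===== PRECONDITION & SPEC =====
def Spec_is_season_suitable (seasons : List String) (month : Int) (out : Bool) : Prop := out = is_season_suitable_alt seasons month
instance (seasons : List String) (month : Int) (out : Bool) : Decidable (Spec_is_season_suitable seasons month out) := by unfold Spec_is_season_suitable; infer_instance

-- ===== CLAIM (what is proved, stated in full; the proofs are below) =====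
def Claim_equal_is_season_suitable : Prop := ∀ (seasons : List String) (month : Int), Dom_is_season_suitable seasons month → Spec_is_season_suitable seasons month (is_season_suitable seasons month)

-- ===== LEMMAS AND PROOFS =====

-- a pattern avoiding c and reaching past u in u ++ c :: v would contain c
theorem prefix_of_append_cons {α : Type} (c : α) (key : List α) (hc : c ∉ key) :
    ∀ (u v : List α), key <+: u ++ c :: v → key <+: u := by
  induction key with
  | nil => intro u v _; exact List.nil_prefix
  | cons k ks ih =>
    intro u v h
    cases u with
    | nil =>
      rw [List.nil_append, List.cons_prefix_cons] at h
      exact absurd (h.1 ▸ List.mem_cons_self) hc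
    | cons u0 u' =>
      rw [List.cons_append, List.cons_prefix_cons] at h
      exact List.cons_prefix_cons.mpr
        ⟨h.1, ih (fun hm => hc (List.mem_cons_of_mem _ hm)) u' v h.2⟩

-- an occurrence of a c-free pattern in u ++ c :: v lies in u or in v
theorem infix_append_cons {α : Type} (c : α) (key : List α) (hc : c ∉ key) :
    ∀ (u v : List α), (key <:+: u ++ c :: v ↔ key <:+: u ∨ key <:+: v) := by
  have hfwd : ∀ (u v : List α), key <:+: u ++ c :: v → key <:+: u ∨ key <:+: v := by
    intro u
    induction u with
    | nil =>
      intro v h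
      rw [List.nil_append, List.infix_cons_iff] at h
      rcases h with h | h
      · cases key with
        | nil => exact Or.inl (List.nil_infix)
        | cons k ks =>
          rw [List.cons_prefix_cons] at h
          exact absurd (h.1 ▸ List.mem_cons_self) hc
      · exact Or.inr h
    | cons u0 u' ih =>
      intro v h
      rw [List.cons_append, List.infix_cons_iff] at h
      rcases h with h | h
      · exact Or.inl ((prefix_of_append_cons c key hc (u0 :: u') v
          (by simpa using h)).isInfix)
      · rcases ih v h with h' | h'
        · exact Or.inl (List.infix_cons h')
        · exact Or.inr h'
  intro u v
  constructor
  · exact hfwd u v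
  · rintro (⟨s, t, rfl⟩ | ⟨s, t, rfl⟩)
    · exact ⟨s, t ++ c :: v, by simp⟩
    · exact ⟨u ++ c :: s, t, by simp⟩

-- a nonempty sep-free pattern occurs in the sep-joined list iff it occurs in some part
theorem infix_join_iff {c : Char} {key : List Char} (hc : c ∉ key) (hne : key ≠ []) :
    ∀ (parts : List (List Char)),
      (key <:+: PySem.Chars.join [c] parts ↔ ∃ p ∈ parts, key <:+: p) := by
  intro parts
  induction parts with
  | nil => simp [PySem.Chars.join_nil, List.infix_nil, hne]
  | cons x rest ih =>
    cases rest with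
    | nil => simp [PySem.Chars.join_singleton]
    | cons y rest' =>
      rw [PySem.Chars.join_cons_cons]
      have hmid : x ++ [c] ++ PySem.Chars.join [c] (y :: rest')
          = x ++ c :: PySem.Chars.join [c] (y :: rest') := by simp
      rw [hmid, infix_append_cons c key hc, ih]
      simp

-- one substring search on the joined lowered haystack = a scan of the lowered strings
theorem isIn_haystack_iff (key : String) (hne : key.toList ≠ []) (hc : '\n' ∉ key.toList)
    (seasons : List String) :
    (PySem.Str.isIn key (PySem.Str.join "\n" (seasons.map PySem.Str.lower)) = true
      ↔ ∃ d ∈ seasons, PySem.Str.isIn key (PySem.Str.lower d) = true) := by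
  rw [PySem.Str.isIn_iff_infix, PySem.Str.toList_join]
  have hsep : ("\n" : String).toList = ['\n'] := by decide
  rw [hsep, infix_join_iff hc hne]
  constructor
  · rintro ⟨p, hp, hinf⟩
    rw [List.map_map] at hp
    rcases List.mem_map.mp hp with ⟨d, hd, rfl⟩
    exact ⟨d, hd, (PySem.Str.isIn_iff_infix _ _).mpr hinf⟩
  · rintro ⟨d, hd, hin⟩
    refine ⟨(PySem.Str.lower d).toList, ?_, (PySem.Str.isIn_iff_infix _ _).mp hin⟩
    rw [List.map_map]
    exact List.mem_map.mpr ⟨d, hd, rfl⟩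

-- A's outer loop is an 'any' over the season strings
theorem loopA_eq_any (month : Int) (seasons : List String) :
    isSeasonLoopA month seasons
      = seasons.any (fun d =>
          seasonMonthsA.any (fun kv =>
            PySem.Str.isIn kv.1 (PySem.Str.lower d) && kv.2.contains month)) := by
  induction seasons with
  | nil => rfl
  | cons d rest ih =>
    simp only [isSeasonLoopA, List.any_cons, ih]
    cases h : seasonMonthsA.any
        (fun kv => PySem.Str.isIn kv.1 (PySem.Str.lower d) && kv.2.contains month) <;>
      simp

theorem pyRange_1_13 : PySem.List.pyRange 1 13 1 = ([1,2,3,4,5,6,7,8,9,10,11,12] : List Int) := by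
  decide

-- the inner dict scan collapses once the month is pinned to a range: the four by-range lemmas
theorem anyA_kharif (seasons : List String) (month : Int) (h : 6 ≤ month ∧ month ≤ 8) :
    seasons.any (fun d => seasonMonthsA.any (fun kv =>
        PySem.Str.isIn kv.1 (PySem.Str.lower d) && kv.2.contains month))
      = seasons.any (fun d => PySem.Str.isIn "kharif" (PySem.Str.lower d)
          || PySem.Str.isIn "year-round" (PySem.Str.lower d)) := by
  have m1 : month ∈ ([6,7,8] : List Int) := by simp; omega
  have m2 : month ∉ ([10,11,12] : List Int) := by simp; omega
  have m3 : month ∉ ([2,3,4] : List Int) := by simp; omega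
  have m4 : month ∈ ([1,2,3,4,5,6,7,8,9,10,11,12] : List Int) := by simp; omega
  simp [seasonMonthsA, pyRange_1_13, m1, m2, m3, m4]

theorem anyA_rabi (seasons : List String) (month : Int) (h : 10 ≤ month ∧ month ≤ 12) :
    seasons.any (fun d => seasonMonthsA.any (fun kv =>
        PySem.Str.isIn kv.1 (PySem.Str.lower d) && kv.2.contains month))
      = seasons.any (fun d => PySem.Str.isIn "rabi" (PySem.Str.lower d)
          || PySem.Str.isIn "year-round" (PySem.Str.lower d)) := by
  have m1 : month ∉ ([6,7,8] : List Int) := by simp; omega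
  have m2 : month ∈ ([10,11,12] : List Int) := by simp; omega
  have m3 : month ∉ ([2,3,4] : List Int) := by simp; omega
  have m4 : month ∈ ([1,2,3,4,5,6,7,8,9,10,11,12] : List Int) := by simp; omega
  simp [seasonMonthsA, pyRange_1_13, m1, m2, m3, m4]

theorem anyA_summer (seasons : List String) (month : Int) (h : 2 ≤ month ∧ month ≤ 4) :
    seasons.any (fun d => seasonMonthsA.any (fun kv =>
        PySem.Str.isIn kv.1 (PySem.Str.lower d) && kv.2.contains month))
      = seasons.any (fun d => PySem.Str.isIn "summer" (PySem.Str.lower d)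
          || PySem.Str.isIn "year-round" (PySem.Str.lower d)) := by
  have m1 : month ∉ ([6,7,8] : List Int) := by simp; omega
  have m2 : month ∉ ([10,11,12] : List Int) := by simp; omega
  have m3 : month ∈ ([2,3,4] : List Int) := by simp; omega
  have m4 : month ∈ ([1,2,3,4,5,6,7,8,9,10,11,12] : List Int) := by simp; omega
  simp [seasonMonthsA, pyRange_1_13, m1, m2, m3, m4]

theorem anyA_year_round (seasons : List String) (month : Int) (ht : 1 ≤ month ∧ month ≤ 12)
    (h1 : ¬ (6 ≤ month ∧ month ≤ 8)) (h2 : ¬ (10 ≤ month ∧ month ≤ 12))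
    (h3 : ¬ (2 ≤ month ∧ month ≤ 4)) :
    seasons.any (fun d => seasonMonthsA.any (fun kv =>
        PySem.Str.isIn kv.1 (PySem.Str.lower d) && kv.2.contains month))
      = seasons.any (fun d => PySem.Str.isIn "year-round" (PySem.Str.lower d)) := by
  have m1 : month ∉ ([6,7,8] : List Int) := by simp; omega
  have m2 : month ∉ ([10,11,12] : List Int) := by simp; omega
  have m3 : month ∉ ([2,3,4] : List Int) := by simp; omega
  have m4 : month ∈ ([1,2,3,4,5,6,7,8,9,10,11,12] : List Int) := by simp; omega
  simp [seasonMonthsA, pyRange_1_13, m1, m2, m3, m4]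

theorem anyA_out (seasons : List String) (month : Int) (ht : ¬ (1 ≤ month ∧ month ≤ 12)) :
    seasons.any (fun d => seasonMonthsA.any (fun kv =>
        PySem.Str.isIn kv.1 (PySem.Str.lower d) && kv.2.contains month)) = false := by
  have m1 : month ∉ ([6,7,8] : List Int) := by simp; omega
  have m2 : month ∉ ([10,11,12] : List Int) := by simp; omega
  have m3 : month ∉ ([2,3,4] : List Int) := by simp; omega
  have m4 : month ∉ ([1,2,3,4,5,6,7,8,9,10,11,12] : List Int) := by simp; omega
  simp [seasonMonthsA, pyRange_1_13, m1, m2, m3, m4]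

-- the shared shape of the three in-range cases: 'key or year-round somewhere' vs B's two
-- haystack searches
theorem case_key (seasons : List String) (key : String)
    (hne : key.toList ≠ []) (hc : '\n' ∉ key.toList) :
    seasons.any (fun d => PySem.Str.isIn key (PySem.Str.lower d)
        || PySem.Str.isIn "year-round" (PySem.Str.lower d))
      = (if PySem.Str.isIn "year-round" (PySem.Str.join "\n" (seasons.map PySem.Str.lower))
         then true
         else PySem.Str.isIn key (PySem.Str.join "\n" (seasons.map PySem.Str.lower))) := by
  have hY := isIn_haystack_iff "year-round" (by decide) (by decide) seasons
  have hK := isIn_haystack_iff key hne hc seasons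
  rw [Bool.eq_iff_iff]
  by_cases hy : PySem.Str.isIn "year-round"
      (PySem.Str.join "\n" (seasons.map PySem.Str.lower)) = true
  · rw [if_pos hy]
    refine iff_of_true ?_ rfl
    rcases hY.mp hy with ⟨d, hd, hyd⟩
    exact List.any_eq_true.mpr ⟨d, hd, by rw [hyd, Bool.or_true]⟩
  · rw [if_neg hy, hK, List.any_eq_true]
    constructor
    · rintro ⟨d, hd, hkd⟩
      cases hk' : PySem.Str.isIn key (PySem.Str.lower d) with
      | true => exact ⟨d, hd, hk'⟩
      | false =>
        have hy' : PySem.Str.isIn "year-round" (PySem.Str.lower d) = true := by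
          rwa [hk', Bool.false_or] at hkd
        exact absurd (hY.mpr ⟨d, hd, hy'⟩) hy
    · rintro ⟨d, hd, h'⟩
      exact ⟨d, hd, by rw [h', Bool.true_or]⟩

-- ===== VERDICT (by name: the statement is the Claim_ definition above) =====
theorem is_season_suitable_spec : Claim_equal_is_season_suitable := by
  intro seasons month _
  unfold Spec_is_season_suitable is_season_suitable is_season_suitable_alt
  rw [loopA_eq_any]
  by_cases ht : 1 ≤ month ∧ month ≤ 12
  · rw [if_neg (not_not_intro ht)]
    by_cases h1 : 6 ≤ month ∧ month ≤ 8
    · rw [anyA_kharif seasons month h1, case_key seasons "kharif" (by decide) (by decide)]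
      by_cases hy : PySem.Str.isIn "year-round"
          (PySem.Str.join "\n" (seasons.map PySem.Str.lower)) = true
      · rw [if_pos hy, if_pos hy]
      · rw [if_neg hy, if_neg hy, if_pos h1]
    · by_cases h2 : 10 ≤ month ∧ month ≤ 12
      · rw [anyA_rabi seasons month h2, case_key seasons "rabi" (by decide) (by decide)]
        by_cases hy : PySem.Str.isIn "year-round"
            (PySem.Str.join "\n" (seasons.map PySem.Str.lower)) = true
        · rw [if_pos hy, if_pos hy]
        · rw [if_neg hy, if_neg hy, if_neg h1, if_pos h2]
      · by_cases h3 : 2 ≤ month ∧ month ≤ 4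
        · rw [anyA_summer seasons month h3, case_key seasons "summer" (by decide) (by decide)]
          by_cases hy : PySem.Str.isIn "year-round"
              (PySem.Str.join "\n" (seasons.map PySem.Str.lower)) = true
          · rw [if_pos hy, if_pos hy]
          · rw [if_neg hy, if_neg hy, if_neg h1, if_neg h2, if_pos h3]
        · rw [anyA_year_round seasons month ht h1 h2 h3]
          by_cases hy : PySem.Str.isIn "year-round"
              (PySem.Str.join "\n" (seasons.map PySem.Str.lower)) = true
          · rw [if_pos hy]
            rcases (isIn_haystack_iff "year-round" (by decide) (by decide) seasons).mp hy
              with ⟨d, hd, hyd⟩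
            exact List.any_eq_true.mpr ⟨d, hd, hyd⟩
          · rw [if_neg hy, if_neg h1, if_neg h2, if_neg h3]
            rw [Bool.eq_iff_iff]
            constructor
            · intro h
              rcases List.any_eq_true.mp h with ⟨d, hd, hyd⟩
              exact absurd ((isIn_haystack_iff "year-round" (by decide) (by decide)
                seasons).mpr ⟨d, hd, hyd⟩) hy
            · intro h; cases h
  · rw [anyA_out seasons month ht, if_pos ht]
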